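-- pv_equiv track=rewrite | github.com/nealcox/Advent-of-Code-2023 | day14/part1.py | calculate
-- ===== SOURCE A (Python) =====
-- def calculate(input_text):
--     answer = 0
--     given = input_text.splitlines()
--     num_rows = len(given)
--     for c in range(len(given[0])):
--         resting_row = 0
--         r = 0
--         while r < num_rows:
--             char = given[r][c]
--             if char == "O":
--                 answer += num_rows - resting_row
--                 resting_row += 1
--                 while resting_row < num_rows and given[resting_row][c] == "#":
--                     resting_row += 1
--             elif char == "#":
--                 resting_row = r
--                 while resting_row < num_rows and given[resting_row][c] == "#":
--                     resting_row += 1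
--             r += 1
--
--     return answer
-- ===== SOURCE B (Python) =====
-- def calculate(input_text):
--     rows = input_text.splitlines()
--     n = len(rows)
--     resting = [0] * len(rows[0])
--     answer = 0
--     for r in range(n):
--         new_resting = []
--         for ch, rest in zip(rows[r], resting):
--             if ch == "#":
--                 new_resting.append(r + 1)
--             elif ch == "O":
--                 answer += n - rest
--                 new_resting.append(rest + 1)
--             else:
--                 new_resting.append(rest)
--         resting = new_resting
--     return answer
-- ===== Notes on version B (the rewrite author's own statement) =====
-- stated objective: alternative
-- what changed: Replaces A's column-by-column scan with nested cube-skipping while-loops by a single row-major sweep over the grid that maintains a vector of per-column resting rows (reset to r+1 at '#'), removing the inner scans.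
import Mathlib
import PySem

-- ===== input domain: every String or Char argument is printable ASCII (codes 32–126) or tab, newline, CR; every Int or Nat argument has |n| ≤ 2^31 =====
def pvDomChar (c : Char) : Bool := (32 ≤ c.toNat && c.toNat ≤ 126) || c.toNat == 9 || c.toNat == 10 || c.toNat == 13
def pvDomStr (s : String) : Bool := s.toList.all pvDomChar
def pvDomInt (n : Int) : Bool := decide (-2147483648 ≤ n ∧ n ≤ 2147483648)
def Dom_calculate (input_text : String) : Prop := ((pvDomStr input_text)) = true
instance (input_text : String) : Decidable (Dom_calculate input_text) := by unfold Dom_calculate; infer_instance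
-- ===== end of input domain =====

-- B replaces A's column-by-column scan (with nested cube-skipping while-loops) by a
-- row-major sweep maintaining a per-column resting-row vector (alternative algorithm).

-- ===== PORT A =====
-- grid accessor given[r][c]; out-of-range reads (excluded by Pre_) default to ' '
def pvCharAt (g : List (List Char)) (r c : Nat) : Char := (g.getD r []).getD c ' '

-- A's inner cube-skipping while-loop over rows
def pvASkip (g : List (List Char)) (c n rest : Nat) : Nat :=
  if rest < n ∧ pvCharAt g rest c = '#' then pvASkip g c n (rest + 1) else rest
termination_by n - rest
decreasing_by omega

-- A's 'while r < num_rows' loop over one column c, state (r, resting_row, answer)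
def pvARow (g : List (List Char)) (c n r rest : Nat) (ans : Int) : Int :=
  if r < n then
    if pvCharAt g r c = 'O' then
      pvARow g c n (r + 1) (pvASkip g c n (rest + 1)) (ans + ((n : Int) - (rest : Int)))
    else if pvCharAt g r c = '#' then
      pvARow g c n (r + 1) (pvASkip g c n r) ans
    else
      pvARow g c n (r + 1) rest ans
  else ans
termination_by n - r
decreasing_by all_goals omega

def calculate (input_text : String) : Int :=
  let given := (PySem.Str.splitlines input_text).map String.toList
  let n := given.length
  (List.range (given.headD []).length).foldl (fun ans c => pvARow given c n 0 0 ans) 0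

-- ===== PORT B =====
-- B's inner 'for ch, rest in zip(rows[r], resting)' loop: builds new_resting and updates answer
def pvBLine (n r : Nat) : List (Char × Nat) → Int → List Nat × Int
  | [], ans => ([], ans)
  | (ch, rest) :: t, ans =>
    if ch = '#' then
      let p := pvBLine n r t ans
      ((r + 1) :: p.1, p.2)
    else if ch = 'O' then
      let p := pvBLine n r t (ans + ((n : Int) - (rest : Int)))
      ((rest + 1) :: p.1, p.2)
    else
      let p := pvBLine n r t ans
      (rest :: p.1, p.2)

-- B's outer 'for r in range(n)' loop, walking down the list of rows
def pvBRows (n : Nat) : List (List Char) → Nat → List Nat → Int → Int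
  | [], _, _, ans => ans
  | line :: t, r, resting, ans =>
    let p := pvBLine n r (line.zip resting) ans
    pvBRows n t (r + 1) p.1 p.2

def calculate_alt (input_text : String) : Int :=
  let rows := (PySem.Str.splitlines input_text).map String.toList
  let n := rows.length
  pvBRows n rows 0 (List.replicate (rows.headD []).length 0) 0

-- ===== PRECONDITION & SPEC =====
-- Pre_ excludes exactly the inputs where Python A raises IndexError: empty input
-- (given[0] on no lines) and grids where some line is shorter than the first line
-- (given[r][c] out of range).
def Pre_calculate (input_text : String) : Prop :=
  let g := (PySem.Str.splitlines input_text).map String.toList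
  g ≠ [] ∧ ∀ row ∈ g, (g.headD []).length ≤ row.length
instance (input_text : String) : Decidable (Pre_calculate input_text) := by
  unfold Pre_calculate; infer_instance

def pvWitness_calculate : String := "O.\n.#"

def Spec_calculate (input_text : String) (out : Int) : Prop := out = calculate_alt input_text
instance (input_text : String) (out : Int) : Decidable (Spec_calculate input_text out) := by unfold Spec_calculate; infer_instance

-- ===== CLAIM =====
def Claim_equal_calculate : Prop := ∀ (input_text : String), Dom_calculate input_text → Pre_calculate input_text → Spec_calculate input_text (calculate input_text)

-- ===== LEMMAS AND PROOFS =====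

-- per-column primitives used only by the proof
def restStep (r : Nat) (ch : Char) (rest : Nat) : Nat :=
  if ch = '#' then r + 1 else if ch = 'O' then rest + 1 else rest

def gain (n : Nat) (ch : Char) (rest : Nat) : Int :=
  if ch = 'O' then (n : Int) - (rest : Int) else 0

-- the answer still to be collected in column c from row r with resting row rest
def colTail (g : List (List Char)) (c n r rest : Nat) : Int :=
  if _h : r < n then
    gain n (pvCharAt g r c) rest + colTail g c n (r + 1) (restStep r (pvCharAt g r c) rest)
  else 0
termination_by n - r
decreasing_by omega

-- the plain one-pass sweep of a single column (reference between A and B)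
def pvColPass (g : List (List Char)) (c n r rest : Nat) (ans : Int) : Int :=
  if r < n then
    if pvCharAt g r c = '#' then
      pvColPass g c n (r + 1) (r + 1) ans
    else if pvCharAt g r c = 'O' then
      pvColPass g c n (r + 1) (rest + 1) (ans + ((n : Int) - (rest : Int)))
    else
      pvColPass g c n (r + 1) rest ans
  else ans
termination_by n - r
decreasing_by all_goals omega

lemma pvASkip_stop (g : List (List Char)) (c n rest : Nat)
    (h : ¬ (rest < n ∧ pvCharAt g rest c = '#')) : pvASkip g c n rest = rest := by
  rw [pvASkip]; simp [h]

lemma pvASkip_hash (g : List (List Char)) (c n rest : Nat)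
    (h1 : rest < n) (h2 : pvCharAt g rest c = '#') :
    pvASkip g c n rest = pvASkip g c n (rest + 1) := by
  rw [pvASkip]; simp [h1, h2]

-- loop invariant: the column pass's resting row is ≤ r, no cube rock lies in [restb, r),
-- and A's resting row is either equal to it or (when restb = r) the cube-skip of r.
lemma pvRow_eq (g : List (List Char)) (c n : Nat) :
    ∀ (k r restb resta : Nat) (ans : Int), n ≤ r + k →
      restb ≤ r →
      (∀ m, restb ≤ m → m < r → pvCharAt g m c ≠ '#') →
      (resta = restb ∨ (restb = r ∧ resta = pvASkip g c n r)) →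
      pvARow g c n r resta ans = pvColPass g c n r restb ans := by
  intro k
  induction k with
  | zero =>
    intro r restb resta ans hn _ _ _
    have hr : ¬ r < n := by omega
    rw [pvARow, pvColPass]; simp [hr]
  | succ k ih =>
    intro r restb resta ans hn hle hnh hd
    by_cases hr : r < n
    · by_cases hH : pvCharAt g r c = '#'
      · have hO : pvCharAt g r c ≠ 'O' := by rw [hH]; decide
        rw [pvARow, pvColPass]
        simp only [hr, if_pos, hH]
        exact ih (r + 1) (r + 1) (pvASkip g c n r) ans (by omega) (le_refl _)
          (by intro m h1 h2; omega)
          (Or.inr ⟨rfl, pvASkip_hash g c n r hr hH⟩)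
      · have hab : resta = restb := by
          rcases hd with h | ⟨h1, h2⟩
          · exact h
          · rw [h2, h1, pvASkip_stop g c n r (by simp [hH])]
        subst hab
        by_cases hO : pvCharAt g r c = 'O'
        · rw [pvARow, pvColPass]
          simp only [hr, if_pos, hO]
          apply ih (r + 1) (resta + 1) (pvASkip g c n (resta + 1)) _ (by omega) (by omega)
          · intro m h1 h2
            rcases Nat.lt_or_ge m r with hm | hm
            · exact hnh m (by omega) hm
            · have : m = r := by omega
              rw [this, hO]; decide
          · rcases Nat.lt_or_ge (resta + 1) (r + 1) with hc | hc
            · left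
              apply pvASkip_stop
              rintro ⟨_, hsh⟩
              rcases Nat.lt_or_ge (resta + 1) r with hm | hm
              · exact hnh (resta + 1) (by omega) hm hsh
              · have : resta + 1 = r := by omega
                rw [this] at hsh; exact hH hsh
            · right
              have : resta + 1 = r + 1 := by omega
              rw [this]; exact ⟨rfl, rfl⟩
        · rw [pvARow, pvColPass]
          simp only [hr, if_pos, hO, hH]
          apply ih (r + 1) resta resta _ (by omega) (by omega) _ (Or.inl rfl)
          intro m h1 h2
          rcases Nat.lt_or_ge m r with hm | hm
          · exact hnh m h1 hm
          · have : m = r := by omega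
            rw [this]; exact hH
    · rw [pvARow, pvColPass]; simp [hr]

lemma colTail_stop (g : List (List Char)) (c n r rest : Nat) (h : ¬ r < n) :
    colTail g c n r rest = 0 := by
  rw [colTail]; simp [h]

lemma pvColPass_eq (g : List (List Char)) (c n : Nat) :
    ∀ (k r rest : Nat) (ans : Int), n ≤ r + k →
      pvColPass g c n r rest ans = ans + colTail g c n r rest := by
  intro k
  induction k with
  | zero =>
    intro r rest ans hn
    have hr : ¬ r < n := by omega
    rw [pvColPass, colTail_stop g c n r rest hr]; simp [hr]
  | succ k ih =>
    intro r rest ans hn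
    by_cases hr : r < n
    · rw [pvColPass, colTail]
      by_cases hH : pvCharAt g r c = '#'
      · have hO : pvCharAt g r c ≠ 'O' := by rw [hH]; decide
        simp only [hr, if_pos, hH, dif_pos]
        rw [ih (r + 1) (r + 1) ans (by omega)]
        simp [gain, restStep]
      · by_cases hO : pvCharAt g r c = 'O'
        · simp only [hr, if_pos, hO, dif_pos]
          rw [ih (r + 1) (rest + 1) _ (by omega)]
          simp [gain, restStep, hO]; ring
        · simp only [hr, if_pos, hH, hO, dif_pos]
          rw [ih (r + 1) rest ans (by omega)]
          simp [gain, restStep, hH, hO]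
    · rw [pvColPass, colTail_stop g c n r rest hr]; simp [hr]

lemma pvBLine_spec (n r : Nat) : ∀ (ps : List (Char × Nat)) (ans : Int),
    pvBLine n r ps ans =
      (ps.map (fun p => restStep r p.1 p.2), ans + (ps.map (fun p => gain n p.1 p.2)).sum) := by
  intro ps
  induction ps with
  | nil => intro ans; simp [pvBLine]
  | cons p t ih =>
    intro ans
    obtain ⟨ch, rest⟩ := p
    by_cases h1 : ch = '#'
    · have h2 : ch ≠ 'O' := by rw [h1]; decide
      simp [pvBLine, h1, ih, restStep, gain]
    · by_cases h2 : ch = 'O'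
      · simp [pvBLine, h2, ih, restStep, gain]; ring
      · simp [pvBLine, h1, h2, ih, restStep, gain]

lemma list_sum_getD (l : List Int) :
    l.sum = ∑ i ∈ Finset.range l.length, l.getD i 0 := by
  induction l with
  | nil => simp
  | cons a t ih =>
    simp only [List.sum_cons, List.length_cons]
    rw [Finset.sum_range_succ']
    simp only [List.getD_cons_succ, List.getD_cons_zero]
    rw [ih]; ring

-- the row-major sweep collects, column by column, exactly the remaining per-column tails
lemma pvBRows_eq (g : List (List Char)) (n w : Nat) (hn : n = g.length)
    (hw : ∀ row ∈ g, w ≤ row.length) :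
    ∀ (t : List (List Char)) (r : Nat) (resting : List Nat) (ans : Int),
      g.drop r = t → resting.length = w →
      pvBRows n t r resting ans
        = ans + ∑ c ∈ Finset.range w, colTail g c n r (resting.getD c 0) := by
  intro t
  induction t with
  | nil =>
    intro r resting ans hdrop hlen
    have hr : g.length ≤ r := by
      by_contra h
      have := List.drop_eq_nil_iff.mp hdrop
      omega
    rw [pvBRows]
    have : ∀ c ∈ Finset.range w, colTail g c n r (resting.getD c 0) = 0 := by
      intro c _
      exact colTail_stop g c n r _ (by omega)
    rw [Finset.sum_congr rfl this]; simp
  | cons line t ih =>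
    intro r resting ans hdrop hlen
    have hget : g[r]? = some line := by
      have h := congrArg (fun l => l[0]?) hdrop
      simpa using h
    have hrlt : r < g.length := (List.getElem?_eq_some_iff.mp hget).1
    have hmem : line ∈ g := List.mem_of_getElem? hget
    have hwl : w ≤ line.length := hw line hmem
    have hgd : g.getD r [] = line := by
      simp [List.getD, hget]
    have hdrop' : g.drop (r + 1) = t := by
      have : g.drop (r + 1) = (g.drop r).drop 1 := by
        rw [List.drop_drop]
      rw [this, hdrop]; rfl
    have hziplen : (line.zip resting).length = w := by
      simp [List.length_zip, hlen]; omega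
    rw [pvBRows, pvBLine_spec]
    rw [ih (r + 1) _ _ hdrop' (by simp [hziplen])]
    have hchar : ∀ c, c < w → pvCharAt g r c = line.getD c ' ' := by
      intro c hc
      simp [pvCharAt, List.getD, hget]
    -- pointwise description of the new resting vector
    have hrest : ∀ c, (hc : c < w) →
        ((line.zip resting).map (fun p => restStep r p.1 p.2)).getD c 0
          = restStep r (pvCharAt g r c) (resting.getD c 0) := by
      intro c hc
      rw [List.getD_eq_getElem _ _ (by simp [hziplen]; omega)]
      simp only [List.getElem_map, List.getElem_zip]
      rw [hchar c hc, List.getD_eq_getElem _ _ (by omega),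
        List.getD_eq_getElem _ _ (by omega)]
    -- the answer delta of this row is the sum of the per-column gains
    have hgain :
        ((line.zip resting).map (fun p => gain n p.1 p.2)).sum
          = ∑ c ∈ Finset.range w, gain n (pvCharAt g r c) (resting.getD c 0) := by
      rw [list_sum_getD]
      have hlen2 : ((line.zip resting).map (fun p => gain n p.1 p.2)).length = w := by
        simp [hziplen]
      rw [hlen2]
      apply Finset.sum_congr rfl
      intro c hc
      have hcw : c < w := Finset.mem_range.mp hc
      rw [List.getD_eq_getElem _ _ (by simp [hziplen]; omega)]
      simp only [List.getElem_map, List.getElem_zip]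
      rw [hchar c hcw, List.getD_eq_getElem _ _ (by omega),
        List.getD_eq_getElem _ _ (by omega)]
    rw [hgain]
    have hsplit : ∀ c ∈ Finset.range w,
        colTail g c n r (resting.getD c 0)
          = gain n (pvCharAt g r c) (resting.getD c 0)
            + colTail g c n (r + 1) (restStep r (pvCharAt g r c) (resting.getD c 0)) := by
      intro c _
      have hrn : r < n := by omega
      rw [colTail]; simp [hrn]
    rw [Finset.sum_congr rfl hsplit, Finset.sum_add_distrib]
    have : ∀ c ∈ Finset.range w,
        colTail g c n (r + 1)
            (((line.zip resting).map (fun p => restStep r p.1 p.2)).getD c 0)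
          = colTail g c n (r + 1) (restStep r (pvCharAt g r c) (resting.getD c 0)) := by
      intro c hc
      rw [hrest c (Finset.mem_range.mp hc)]
    rw [Finset.sum_congr rfl this]
    ring

lemma foldl_pvARow (g : List (List Char)) (n : Nat) :
    ∀ (cs : List Nat) (ans : Int),
      cs.foldl (fun ans c => pvARow g c n 0 0 ans) ans
        = ans + (cs.map (fun c => colTail g c n 0 0)).sum := by
  intro cs
  induction cs with
  | nil => intro ans; simp
  | cons c cs ih =>
    intro ans
    simp only [List.foldl_cons, List.map_cons, List.sum_cons]
    rw [pvRow_eq g c n n 0 0 0 ans (by omega) (le_refl _) (by intro m h1 h2; omega)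
      (Or.inl rfl)]
    rw [pvColPass_eq g c n n 0 0 ans (by omega), ih]
    ring

lemma sum_range_list (w : Nat) (f : Nat → Int) :
    ((List.range w).map f).sum = ∑ c ∈ Finset.range w, f c := by
  induction w with
  | zero => simp
  | succ w ih => rw [List.range_succ, Finset.sum_range_succ]; simp [ih]

-- ===== VERDICT =====
theorem calculate_spec : Claim_equal_calculate := by
  intro input_text _ hpre
  obtain ⟨hne, hw⟩ := hpre
  unfold Spec_calculate calculate calculate_alt
  rw [foldl_pvARow _ _, sum_range_list,
    pvBRows_eq ((PySem.Str.splitlines input_text).map String.toList) _ _ rfl hw _ 0 _ 0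
      (by simp) (by simp)]
  simp
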